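-- pv_equiv track=rewrite | github.com/miliar/Code_Jam_Webscraper | solutions_python/solutions_year11_round0_nr1/925.py | BotTrust
-- ===== SOURCE A (Python) =====
-- def BotTrust(button_list):
--     total_sec = 0
--     cur_pos = {'O':1, 'B':1} # current robot position
--     acc_sec = 0
--     acc_robot = button_list[0][0]
--     for btn in button_list:
-- #        print 'seq = ', btn
--         pos_diff = abs(btn[1] - cur_pos[btn[0]])
-- #        print 'pos_diff = ', pos_diff
-- #        print 'acc_robot(before) = ', acc_robot
-- #        print 'acc_sec(before) = ', acc_sec
--
--         if btn[0] == acc_robot: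
--             total_sec += pos_diff + 1
--             acc_sec += pos_diff + 1
--         else:
--             temp = pos_diff - acc_sec
--             if temp > 0:
--                 total_sec += temp + 1
--                 acc_sec = temp + 1
--             else:
--                 total_sec += 1
--                 acc_sec = 1
--             acc_robot = btn[0] # change accumelated robot
--
--         cur_pos[btn[0]] = btn[1]
--  #       print 'acc_robot(after) = ', acc_robot
--  #       print 'acc_sec(after) = ', acc_sec
--  #       print 'total_sec = ', total_sec
--  #       print '\n'
--
--     return total_sec
-- ===== SOURCE B (Python) =====
-- def BotTrust(button_list):
--     pos = {'O': 1, 'B': 1}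
--     last = {'O': 0, 'B': 0}  # time of each robot's last press
--     time = 0
--     for color, button in button_list:
--         dist = abs(pos[color] - button)
--         time = max(time + 1, last[color] + dist + 1)
--         last[color] = time
--         pos[color] = button
--     return time
-- ===== Notes on version B (the rewrite author's own statement) =====
-- stated objective: simpler
-- what changed: Replaces A's lead-accumulator state (acc_robot/acc_sec tracking how far the last-pressing robot is ahead) with the standard Bot Trust recurrence: a global clock plus each robot's last-press time, time = max(time+1, last[color]+dist+1).
-- outside the precondition, e.g. on BotTrust([]): A raises IndexError, B returns 0
import Mathlib
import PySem

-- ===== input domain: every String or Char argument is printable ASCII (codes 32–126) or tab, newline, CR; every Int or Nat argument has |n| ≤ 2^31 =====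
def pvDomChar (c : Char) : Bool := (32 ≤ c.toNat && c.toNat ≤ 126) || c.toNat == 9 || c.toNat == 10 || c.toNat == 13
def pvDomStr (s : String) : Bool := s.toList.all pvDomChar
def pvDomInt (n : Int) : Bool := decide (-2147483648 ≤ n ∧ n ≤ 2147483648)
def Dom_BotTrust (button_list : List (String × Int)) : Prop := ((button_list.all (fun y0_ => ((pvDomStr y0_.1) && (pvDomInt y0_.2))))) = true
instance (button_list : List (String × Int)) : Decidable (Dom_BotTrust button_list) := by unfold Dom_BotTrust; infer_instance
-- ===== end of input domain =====

-- B replaces A's lead-accumulator (acc_robot/acc_sec) state with the standard global-clock +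
-- per-robot last-press-time recurrence; objective: simpler. Proved equal on Pre_ (nonempty,
-- colors 'O'/'B'); on [] A raises IndexError while B returns 0.

-- ===== PORT A =====
-- loop state: cur_pos dict, total_sec, acc_sec, acc_robot; dict lookup uses getD 0
-- (a KeyError for a color other than 'O'/'B' is excluded by Pre_BotTrust)
def BotTrustLoop (cur_pos : PySem.Dict String Int) (total_sec acc_sec : Int)
    (acc_robot : String) : List (String × Int) → Int
  | [] => total_sec
  | btn :: rest =>
    let pos_diff := |btn.2 - cur_pos.getD btn.1 0|
    if btn.1 == acc_robot then
      BotTrustLoop (cur_pos.insert btn.1 btn.2) (total_sec + (pos_diff + 1))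
        (acc_sec + (pos_diff + 1)) acc_robot rest
    else
      let temp := pos_diff - acc_sec
      if temp > 0 then
        BotTrustLoop (cur_pos.insert btn.1 btn.2) (total_sec + (temp + 1)) (temp + 1) btn.1 rest
      else
        BotTrustLoop (cur_pos.insert btn.1 btn.2) (total_sec + 1) 1 btn.1 rest

def BotTrust (button_list : List (String × Int)) : Int :=
  -- acc_robot = button_list[0][0]: IndexError on [] (excluded by Pre_BotTrust)
  match button_list with
  | [] => 0
  | (c0, _) :: _ =>
    BotTrustLoop ((PySem.Dict.empty.insert "O" 1).insert "B" 1) 0 0 c0 button_list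

-- ===== PORT B =====
-- loop state: pos dict, last dict (each robot's last press time), global clock
def BotTrustAltLoop (pos last : PySem.Dict String Int) (time : Int) :
    List (String × Int) → Int
  | [] => time
  | (color, button) :: rest =>
    let dist := |pos.getD color 0 - button|
    let time' := max (time + 1) (last.getD color 0 + dist + 1)
    BotTrustAltLoop (pos.insert color button) (last.insert color time') time' rest

def BotTrust_alt (button_list : List (String × Int)) : Int :=
  BotTrustAltLoop ((PySem.Dict.empty.insert "O" 1).insert "B" 1)
    ((PySem.Dict.empty.insert "O" 0).insert "B" 0) 0 button_list

-- ===== PRECONDITION & SPEC =====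
-- A raises IndexError on [] and KeyError on any color other than "O"/"B"; Pre_ excludes exactly those.
def Pre_BotTrust (button_list : List (String × Int)) : Prop :=
  button_list ≠ [] ∧ ∀ p ∈ button_list, p.1 = "O" ∨ p.1 = "B"
instance (button_list : List (String × Int)) : Decidable (Pre_BotTrust button_list) := by
  unfold Pre_BotTrust; infer_instance

def pvWitness_BotTrust : (List (String × Int)) := [("O", 5), ("B", 8), ("O", 3)]

def Spec_BotTrust (button_list : List (String × Int)) (out : Int) : Prop :=
  out = BotTrust_alt button_list
instance (button_list : List (String × Int)) (out : Int) : Decidable (Spec_BotTrust button_list out) := by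
  unfold Spec_BotTrust; infer_instance

-- ===== CLAIM (what is proved, stated in full; the proofs are below) =====
def Claim_equal_BotTrust : Prop := ∀ (button_list : List (String × Int)), Dom_BotTrust button_list → Pre_BotTrust button_list → Spec_BotTrust button_list (BotTrust button_list)

-- ===== LEMMAS AND PROOFS =====

-- the other robot's name
def otherRobot (r : String) : String := if r = "O" then "B" else "O"

lemma otherRobot_ne (r : String) (h : r = "O" ∨ r = "B") : otherRobot r ≠ r := by
  rcases h with h | h <;> simp [otherRobot, h]

lemma eq_otherRobot {c r : String} (hc : c = "O" ∨ c = "B") (hr : r = "O" ∨ r = "B")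
    (hne : c ≠ r) : c = otherRobot r ∧ r = otherRobot c := by
  rcases hc with hc | hc <;> rcases hr with hr | hr <;>
    simp_all [otherRobot]

/-- Main loop invariant: A's loop and B's loop agree when
    total = time, last[acc_robot] = time and acc_sec = time - last[other acc_robot]. -/
lemma loop_eq (l : List (String × Int)) :
    ∀ (pos last : PySem.Dict String Int) (total acc_sec time : Int) (acc_robot : String),
    (∀ p ∈ l, p.1 = "O" ∨ p.1 = "B") →
    (acc_robot = "O" ∨ acc_robot = "B") →
    total = time →
    last.getD acc_robot 0 = time →
    acc_sec = time - last.getD (otherRobot acc_robot) 0 →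
    BotTrustLoop pos total acc_sec acc_robot l = BotTrustAltLoop pos last time l := by
  induction l with
  | nil => intro _ _ _ _ _ _ _ _ ht _ _; simpa [BotTrustLoop, BotTrustAltLoop] using ht
  | cons btn rest ih =>
    rintro pos last total acc_sec time acc_robot hcols hr ht hlast hacc
    obtain ⟨c, b⟩ := btn
    have hc : c = "O" ∨ c = "B" := hcols (c, b) (by simp)
    have hrest : ∀ p ∈ rest, p.1 = "O" ∨ p.1 = "B" := fun p hp => hcols p (by simp [hp])
    by_cases hceq : c = acc_robot
    · -- same robot: time advances by pos_diff + 1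
      subst hceq
      simp only [BotTrustLoop, BotTrustAltLoop, beq_self_eq_true, if_pos]
      set d := |b - pos.getD c 0| with hd
      have hd' : |pos.getD c 0 - b| = d := by rw [hd, abs_sub_comm]
      have hd0 : 0 ≤ d := abs_nonneg _
      rw [hd']
      have htime : max (time + 1) (last.getD c 0 + d + 1) = time + (d + 1) := by
        rw [hlast]; omega
      rw [htime]
      apply ih _ _ _ _ _ _ hrest hc (by omega)
      · simp
      · rw [PySem.Dict.getD_insert, if_neg (otherRobot_ne c hc)]; omega
    · -- robot switch
      obtain ⟨hco, hrc⟩ := eq_otherRobot hc hr hceq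
      have hlc : last.getD c 0 = time - acc_sec := by rw [hco]; omega
      have hne : (c == acc_robot) = false := by simp [hceq]
      simp only [BotTrustLoop, BotTrustAltLoop, hne, Bool.false_eq_true, if_false]
      set d := |b - pos.getD c 0| with hd
      have hd' : |pos.getD c 0 - b| = d := by rw [hd, abs_sub_comm]
      have hd0 : 0 ≤ d := abs_nonneg _
      rw [hd']
      by_cases htmp : d - acc_sec > 0
      · rw [if_pos htmp]
        have htime : max (time + 1) (last.getD c 0 + d + 1) = time + (d - acc_sec + 1) := by
          rw [hlc]; omega
        rw [htime]
        apply ih _ _ _ _ _ _ hrest hc (by omega)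
        · simp
        · rw [PySem.Dict.getD_insert, if_neg (otherRobot_ne c hc), ← hrc, hlast]; omega
      · rw [if_neg htmp]
        have htime : max (time + 1) (last.getD c 0 + d + 1) = time + 1 := by
          rw [hlc]; omega
        rw [htime]
        apply ih _ _ _ _ _ _ hrest hc (by omega)
        · simp
        · rw [PySem.Dict.getD_insert, if_neg (otherRobot_ne c hc), ← hrc, hlast]; omega

-- ===== VERDICT (by name: the statement is the Claim_ definition above) =====
theorem BotTrust_spec : Claim_equal_BotTrust := by
  intro l _ hpre
  obtain ⟨hne, hcols⟩ := hpre
  unfold Spec_BotTrust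
  match l, hne with
  | (c0, b0) :: rest, _ =>
    have hc0 : c0 = "O" ∨ c0 = "B" := hcols (c0, b0) (by simp)
    unfold BotTrust BotTrust_alt
    apply loop_eq _ _ _ _ _ _ _ hcols hc0 rfl
    · rcases hc0 with h | h <;> subst h <;> decide
    · rcases hc0 with h | h <;> subst h <;> decide
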